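-- pv_equiv track=rewrite | github.com/sage-base/sagebase | scripts/investigate_kaiha_mapping.py | get_all_shuugiin_kaiha_with_range
-- ===== SOURCE A (Python) =====
-- from typing import Any
--
-- def get_all_shuugiin_kaiha_with_range(
--     session_kaiha: dict[int, dict[str, int]],
-- ) -> dict[str, dict[str, Any]]:
--     """全会派名とその出現回次範囲を算出する.
--
--     Returns:
--         {会派名: {"min_session": int, "max_session": int, "total_count": int}}
--     """
--     kaiha_range: dict[str, dict[str, Any]] = {}
--     for session_num, kaiha_dict in session_kaiha.items():
--         for name, count in kaiha_dict.items():
--             if name not in kaiha_range: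
--                 kaiha_range[name] = {
--                     "min_session": session_num,
--                     "max_session": session_num,
--                     "total_count": count,
--                 }
--             else:
--                 entry = kaiha_range[name]
--                 entry["min_session"] = min(entry["min_session"], session_num)
--                 entry["max_session"] = max(entry["max_session"], session_num)
--                 entry["total_count"] += count
--     return kaiha_range
-- ===== SOURCE B (Python) =====
-- """B: collect-then-reduce — group (session, count) pairs per name, then reduce with min/max/sum."""
-- def get_all_shuugiin_kaiha_with_range(session_kaiha):
--     """全会派名とその出現回次範囲を算出する (collect-then-reduce)."""
--     groups = {}
--     for session_num, kaiha_dict in session_kaiha.items():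
--         for name, count in kaiha_dict.items():
--             groups.setdefault(name, []).append((session_num, count))
--     return {
--         name: {
--             "min_session": min(s for s, _ in pairs),
--             "max_session": max(s for s, _ in pairs),
--             "total_count": sum(c for _, c in pairs),
--         }
--         for name, pairs in groups.items()
--     }
-- ===== Notes on version B (the rewrite author's own statement) =====
-- stated objective: alternative
-- what changed: B replaces A's incremental running min/max/sum per name with a collect-then-reduce decomposition: one pass groups all (session, count) pairs per name in first-appearance order, then a dict comprehension reduces each group with min/max/sum.
import Mathlib
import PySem

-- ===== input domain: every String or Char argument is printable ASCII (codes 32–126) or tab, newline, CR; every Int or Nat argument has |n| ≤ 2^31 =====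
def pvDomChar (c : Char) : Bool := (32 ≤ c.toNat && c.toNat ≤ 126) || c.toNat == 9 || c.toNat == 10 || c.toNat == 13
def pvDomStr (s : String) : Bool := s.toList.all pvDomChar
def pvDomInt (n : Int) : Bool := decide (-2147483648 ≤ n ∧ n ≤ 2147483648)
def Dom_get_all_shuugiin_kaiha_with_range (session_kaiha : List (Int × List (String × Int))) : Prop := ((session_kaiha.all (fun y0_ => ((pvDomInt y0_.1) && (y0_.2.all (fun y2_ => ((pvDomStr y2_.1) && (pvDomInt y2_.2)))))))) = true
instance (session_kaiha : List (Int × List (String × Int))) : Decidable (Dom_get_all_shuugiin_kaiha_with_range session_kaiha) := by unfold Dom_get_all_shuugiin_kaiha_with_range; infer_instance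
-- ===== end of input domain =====

-- B re-implements A by collect-then-reduce: group (session, count) pairs per name, then reduce each group with min/max/sum (alternative decomposition, same cost); proved to return the same value on every input.


-- ===== PORT A =====
-- A's inner dict entry literal: {"min_session": s, "max_session": s, "total_count": c}
def pvEntryInit (s c : Int) : PySem.Dict String Int :=
  ((PySem.Dict.empty.insert "min_session" s).insert "max_session" s).insert "total_count" c

-- A's in-place update of an existing entry (entry[k] always exists; getD 0 is the
-- lookup rendered total — the default is never read on states A produces)
def pvEntryUpd (e : PySem.Dict String Int) (s c : Int) : PySem.Dict String Int :=
  let e1 := e.insert "min_session" (min (e.getD "min_session" 0) s)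
  let e2 := e1.insert "max_session" (max (e1.getD "max_session" 0) s)
  e2.insert "total_count" (e2.getD "total_count" 0 + c)

def get_all_shuugiin_kaiha_with_range (session_kaiha : List (Int × List (String × Int))) : List (String × List (String × Int)) :=
  ((session_kaiha.foldl
      (fun kr sk =>
        sk.2.foldl
          (fun kr nc =>
            match kr.get? nc.1 with
            | none => kr.insert nc.1 (pvEntryInit sk.1 nc.2)          -- name not in kaiha_range
            | some e => kr.insert nc.1 (pvEntryUpd e sk.1 nc.2))      -- mutate the existing entry
          kr)
      (PySem.Dict.empty : PySem.Dict String (PySem.Dict String Int))).items).map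
    (fun p => (p.1, p.2.items))

-- ===== PORT B =====
-- B's dict comprehension body: min/max over the sessions, sum over the counts
-- (min/max raise on empty in Python; groups values are always nonempty, so .getD 0 is never read)
def pvReduce (pairs : List (Int × Int)) : List (String × Int) :=
  [("min_session", (PySem.List.min? (pairs.map Prod.fst) (fun y => y)).getD 0),
   ("max_session", (PySem.List.max? (pairs.map Prod.fst) (fun y => y)).getD 0),
   ("total_count", (pairs.map Prod.snd).sum)]

def get_all_shuugiin_kaiha_with_range_alt (session_kaiha : List (Int × List (String × Int))) : List (String × List (String × Int)) :=
  let groups : PySem.Dict String (List (Int × Int)) :=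
    session_kaiha.foldl
      (fun g sk =>
        sk.2.foldl (fun g nc => g.modify nc.1 [] (· ++ [(sk.1, nc.2)])) g)  -- setdefault(name, []).append(...)
      PySem.Dict.empty
  groups.items.map (fun p => (p.1, pvReduce p.2))

-- ===== PRECONDITION & SPEC =====
def Spec_get_all_shuugiin_kaiha_with_range (session_kaiha : List (Int × List (String × Int))) (out : List (String × List (String × Int))) : Prop := out = get_all_shuugiin_kaiha_with_range_alt session_kaiha
instance (session_kaiha : List (Int × List (String × Int))) (out : List (String × List (String × Int))) : Decidable (Spec_get_all_shuugiin_kaiha_with_range session_kaiha out) := by unfold Spec_get_all_shuugiin_kaiha_with_range; infer_instance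

-- ===== CLAIM (what is proved, stated in full; the proofs are below) =====
def Claim_equal_get_all_shuugiin_kaiha_with_range : Prop := ∀ (session_kaiha : List (Int × List (String × Int))), Dom_get_all_shuugiin_kaiha_with_range session_kaiha → Spec_get_all_shuugiin_kaiha_with_range session_kaiha (get_all_shuugiin_kaiha_with_range session_kaiha)

-- ===== LEMMAS AND PROOFS =====

-- proof-side view of one aggregated entry: the inner dict B's comprehension builds
def pvRed (pairs : List (Int × Int)) : PySem.Dict String Int := PySem.Dict.mk (pvReduce pairs)

-- proof-side view of A's whole state as the image of B's grouping state
def pvMapRed (g : PySem.Dict String (List (Int × Int))) : PySem.Dict String (PySem.Dict String Int) :=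
  PySem.Dict.mk (g.items.map (fun p => (p.1, pvRed p.2)))

theorem pv_get?_mk_map (l : List (String × List (Int × Int))) (k : String) :
    (PySem.Dict.mk (l.map (fun p => (p.1, pvRed p.2)))).get? k
      = ((PySem.Dict.mk l).get? k).map pvRed := by
  induction l with
  | nil => rfl
  | cons x t ih =>
      obtain ⟨k1, v1⟩ := x
      simp only [List.map_cons, PySem.Dict.get?_mk_cons]
      by_cases h : k1 == k
      · simp [h]
      · simp [h, ih]

theorem pv_get?_mapRed (g : PySem.Dict String (List (Int × Int))) (k : String) :
    (pvMapRed g).get? k = (g.get? k).map pvRed := by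
  have h : g = PySem.Dict.mk g.items := rfl
  rw [pvMapRed, pv_get?_mk_map, ← h]

theorem pv_insert_mapRed (g : PySem.Dict String (List (Int × Int))) (k : String)
    (v : List (Int × Int)) :
    pvMapRed (g.insert k v) = (pvMapRed g).insert k (pvRed v) := by
  apply PySem.Dict.ext
  have hc : (pvMapRed g).contains k = g.contains k := by
    rw [PySem.Dict.contains_eq_decide_mem_keys, PySem.Dict.contains_eq_decide_mem_keys]
    have : (pvMapRed g).keys = g.keys := by
      simp [pvMapRed, PySem.Dict.keys]
    rw [this]
  show ((g.insert k v).items.map (fun p => (p.1, pvRed p.2)))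
      = ((pvMapRed g).insert k (pvRed v)).items
  rw [PySem.Dict.items_insert, PySem.Dict.items_insert, hc]
  split_ifs with h
  · show _ = (pvMapRed g).items.map _
    have hi : (pvMapRed g).items = g.items.map (fun p => (p.1, pvRed p.2)) := rfl
    rw [hi, List.map_map, List.map_map]
    refine List.map_congr_left ?_
    intro p _
    by_cases hk : p.1 = k <;> simp [hk]
  · show _ = (pvMapRed g).items ++ _
    have hi : (pvMapRed g).items = g.items.map (fun p => (p.1, pvRed p.2)) := rfl
    rw [hi, List.map_append]
    rfl

theorem pv_red_singleton (s c : Int) : pvRed [(s, c)] = pvEntryInit s c := by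
  simp [pvRed, pvReduce, pvEntryInit, PySem.List.min?_id_cons, PySem.List.max?_id_cons]
  rfl

theorem pv_red_append (x : Int × Int) (rest : List (Int × Int)) (s c : Int) :
    pvEntryUpd (pvRed (x :: rest)) s c = pvRed ((x :: rest) ++ [(s, c)]) := by
  simp only [pvRed, pvReduce, List.map_cons, List.map_append,
    PySem.List.min?_id_cons, PySem.List.max?_id_cons, Option.getD_some,
    List.foldl_append, List.map_nil, List.foldl_cons, List.foldl_nil,
    List.sum_cons, List.sum_append, List.sum_nil, List.cons_append]
  have hupd : ∀ (m M T : Int),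
      pvEntryUpd (PySem.Dict.mk [("min_session", m), ("max_session", M), ("total_count", T)]) s c
        = PySem.Dict.mk [("min_session", min m s), ("max_session", max M s),
            ("total_count", T + c)] := fun m M T => rfl
  rw [hupd]
  have hadd : x.2 + ((rest.map Prod.snd).sum + (c + 0)) = x.2 + (rest.map Prod.snd).sum + c := by
    omega
  rw [hadd]

theorem pv_step (g : PySem.Dict String (List (Int × Int)))
    (hg : ∀ v ∈ g.values, v ≠ []) (k : String) (s c : Int) :
    (match (pvMapRed g).get? k with
     | none => (pvMapRed g).insert k (pvEntryInit s c)
     | some e => (pvMapRed g).insert k (pvEntryUpd e s c))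
      = pvMapRed (g.modify k [] (· ++ [(s, c)])) := by
  have hmod : g.modify k [] (· ++ [(s, c)]) = g.insert k (g.getD k [] ++ [(s, c)]) := rfl
  rw [hmod, pv_insert_mapRed, pv_get?_mapRed]
  cases h : g.get? k with
  | none =>
      rw [PySem.Dict.getD_eq_get?_getD, h]
      simp [pv_red_singleton]
  | some v =>
      have hv : v ≠ [] := by
        apply hg
        have := PySem.Dict.mem_items_of_get?_eq_some g h
        exact List.mem_map_of_mem this
      obtain ⟨x, rest, rfl⟩ : ∃ x rest, v = x :: rest := by
        cases v with
        | nil => exact absurd rfl hv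
        | cons x rest => exact ⟨x, rest, rfl⟩
      rw [PySem.Dict.getD_eq_get?_getD, h]
      simp [pv_red_append]

theorem pv_inv_step (g : PySem.Dict String (List (Int × Int)))
    (hg : ∀ v ∈ g.values, v ≠ []) (k : String) (s c : Int) :
    ∀ v ∈ (g.modify k [] (· ++ [(s, c)])).values, v ≠ [] := by
  have hmod : g.modify k [] (· ++ [(s, c)]) = g.insert k (g.getD k [] ++ [(s, c)]) := rfl
  rw [hmod]
  intro v hv
  rcases PySem.Dict.mem_values_insert g k _ v hv with rfl | hmem
  · simp
  · exact hg v hmem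

theorem pv_inner (s : Int) (l : List (String × Int))
    (g : PySem.Dict String (List (Int × Int))) (hg : ∀ v ∈ g.values, v ≠ []) :
    (l.foldl
        (fun kr nc =>
          match kr.get? nc.1 with
          | none => kr.insert nc.1 (pvEntryInit s nc.2)
          | some e => kr.insert nc.1 (pvEntryUpd e s nc.2)) (pvMapRed g)
      = pvMapRed (l.foldl (fun g nc => g.modify nc.1 [] (· ++ [(s, nc.2)])) g))
    ∧ ∀ v ∈ (l.foldl (fun g nc => g.modify nc.1 [] (· ++ [(s, nc.2)])) g).values, v ≠ [] := by
  induction l generalizing g with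
  | nil => exact ⟨rfl, hg⟩
  | cons nc t ih =>
      have h1 := pv_step g hg nc.1 s nc.2
      have h2 := pv_inv_step g hg nc.1 s nc.2
      have := ih (g.modify nc.1 [] (· ++ [(s, nc.2)])) h2
      exact ⟨by simpa [h1] using this.1, this.2⟩

theorem pv_outer (sks : List (Int × List (String × Int)))
    (g : PySem.Dict String (List (Int × Int))) (hg : ∀ v ∈ g.values, v ≠ []) :
    (sks.foldl
        (fun kr sk =>
          sk.2.foldl
            (fun kr nc =>
              match kr.get? nc.1 with
              | none => kr.insert nc.1 (pvEntryInit sk.1 nc.2)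
              | some e => kr.insert nc.1 (pvEntryUpd e sk.1 nc.2)) kr) (pvMapRed g)
      = pvMapRed (sks.foldl
          (fun g sk => sk.2.foldl (fun g nc => g.modify nc.1 [] (· ++ [(sk.1, nc.2)])) g) g))
    ∧ ∀ v ∈ (sks.foldl
          (fun g sk => sk.2.foldl (fun g nc => g.modify nc.1 [] (· ++ [(sk.1, nc.2)])) g)
          g).values, v ≠ [] := by
  induction sks generalizing g with
  | nil => exact ⟨rfl, hg⟩
  | cons sk t ih =>
      have h := pv_inner sk.1 sk.2 g hg
      have := ih (sk.2.foldl (fun g nc => g.modify nc.1 [] (· ++ [(sk.1, nc.2)])) g) h.2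
      exact ⟨by rw [List.foldl_cons, List.foldl_cons, h.1, this.1], this.2⟩

-- ===== VERDICT (by name: the statement is the Claim_ definition above) =====
theorem get_all_shuugiin_kaiha_with_range_spec : Claim_equal_get_all_shuugiin_kaiha_with_range := by
  intro sks _
  show get_all_shuugiin_kaiha_with_range sks = get_all_shuugiin_kaiha_with_range_alt sks
  unfold get_all_shuugiin_kaiha_with_range get_all_shuugiin_kaiha_with_range_alt
  have hempty : (PySem.Dict.empty : PySem.Dict String (PySem.Dict String Int))
      = pvMapRed PySem.Dict.empty := rfl
  rw [hempty, (pv_outer sks PySem.Dict.empty (by intro v hv; cases hv)).1]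
  generalize (sks.foldl
      (fun g sk => sk.2.foldl (fun g nc => g.modify nc.1 [] (· ++ [(sk.1, nc.2)])) g)
      PySem.Dict.empty) = G
  show ((pvMapRed G).items).map (fun p => (p.1, p.2.items)) = G.items.map _
  have : (pvMapRed G).items = G.items.map (fun p => (p.1, pvRed p.2)) := rfl
  rw [this, List.map_map]
  rfl
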